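-- pv_equiv track=rewrite | github.com/perrette/papers | papers/filename.py | listtag
-- ===== SOURCE A (Python) =====
-- def listtag(words, maxlength=30, minwordlen=3, n=100, sep='-'):
--     # preformat & filter words
--     words = [word for word in words if len(word) >= minwordlen]
--     while True:
--         tag = sep.join(words[:n])
--         n -= 1
--         if len(tag) <= maxlength or n < 2:
--             break
--     return tag
-- ===== SOURCE B (Python) =====
-- def listtag(words, maxlength=30, minwordlen=3, n=100, sep='-'):
--     # filter words, then pick the prefix length directly via prefix-cost sums
--     # (one pass) instead of re-joining ever-shorter prefixes.
--     ws = [word for word in words if len(word) >= minwordlen]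
--     if n < 2:
--         return sep.join(ws[:n])
--     # costs[i] = len(sep.join(ws[:i+1]))
--     costs = []
--     t = 0
--     for w in ws:
--         t = len(w) if not costs else t + len(sep) + len(w)
--         costs.append(t)
--     hi = min(n, len(ws))
--     best = 2
--     for k in range(2, hi + 1):
--         if costs[k - 1] <= maxlength:
--             best = k
--     return sep.join(ws[:best])
-- ===== Notes on version B (the rewrite author's own statement) =====
-- stated objective: alternative
-- what changed: A rejoins an ever-shorter prefix from scratch while counting n down; B builds prefix-length sums in one pass over the filtered words and scans k=2..min(n,len) once for the largest fitting prefix, joining only once.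
import Mathlib
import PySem

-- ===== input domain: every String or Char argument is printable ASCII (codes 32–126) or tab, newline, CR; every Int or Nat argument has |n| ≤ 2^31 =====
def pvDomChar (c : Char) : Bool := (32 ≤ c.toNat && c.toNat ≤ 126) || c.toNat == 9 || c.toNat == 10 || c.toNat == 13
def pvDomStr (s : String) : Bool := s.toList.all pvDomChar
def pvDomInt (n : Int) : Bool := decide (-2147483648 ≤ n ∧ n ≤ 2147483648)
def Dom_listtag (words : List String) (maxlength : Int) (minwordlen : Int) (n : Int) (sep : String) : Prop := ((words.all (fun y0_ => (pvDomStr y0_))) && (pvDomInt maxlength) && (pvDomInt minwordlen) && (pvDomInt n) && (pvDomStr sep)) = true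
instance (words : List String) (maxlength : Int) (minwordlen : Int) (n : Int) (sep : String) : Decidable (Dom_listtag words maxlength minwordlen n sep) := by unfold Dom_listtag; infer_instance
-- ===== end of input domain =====

-- B replaces A's "re-join an ever-shorter prefix until it fits" loop by one prefix-cost
-- pass plus a scan for the largest fitting prefix (objective: alternative algorithm).

-- ===== PORT A =====
-- the 'while True' loop: tag = sep.join(words[:n]); n -= 1; break if it fits or n < 2
def listtagLoop (ws : List String) (maxlength : Int) (sep : String) (n : Int) : String :=
  let tag := PySem.Str.join sep (PySem.List.slice ws none (some n))
  if h : PySem.Str.len tag ≤ maxlength ∨ n - 1 < 2 then tag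
  else listtagLoop ws maxlength sep (n - 1)
termination_by (n - 1).toNat
decreasing_by
  omega

def listtag (words : List String) (maxlength : Int) (minwordlen : Int) (n : Int) (sep : String) : String :=
  let ws := words.filter fun w => decide (minwordlen ≤ PySem.Str.len w)
  listtagLoop ws maxlength sep n

-- ===== PORT B =====
-- the 'for w in ws' loop building costs: costs[i] = len(sep.join(ws[:i+1]))
def altCosts (sep : String) (ws : List String) : Int × List Int :=
  ws.foldl (fun (p : Int × List Int) w =>
    let t := if p.2 = [] then PySem.Str.len w else p.1 + PySem.Str.len sep + PySem.Str.len w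
    (t, p.2 ++ [t])) (0, [])

-- the 'for k in range(2, hi + 1)' loop; costs[k-1] is always in range, so getD's default is never used
def altBest (maxlength : Int) (costs : List Int) (hi : Int) : Int :=
  (PySem.List.pyRange 2 (hi + 1)).foldl
    (fun best k => if PySem.List.pyGetD costs (k - 1) 0 ≤ maxlength then k else best) 2

def listtag_alt (words : List String) (maxlength : Int) (minwordlen : Int) (n : Int) (sep : String) : String :=
  let ws := words.filter fun w => decide (minwordlen ≤ PySem.Str.len w)
  if n < 2 then PySem.Str.join sep (PySem.List.slice ws none (some n))
  else
    let costs := (altCosts sep ws).2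
    let hi := min n (ws.length : Int)
    PySem.Str.join sep (PySem.List.slice ws none (some (altBest maxlength costs hi)))

-- ===== PRECONDITION & SPEC =====
def Spec_listtag (words : List String) (maxlength : Int) (minwordlen : Int) (n : Int) (sep : String) (out : String) : Prop := out = listtag_alt words maxlength minwordlen n sep
instance (words : List String) (maxlength : Int) (minwordlen : Int) (n : Int) (sep : String) (out : String) : Decidable (Spec_listtag words maxlength minwordlen n sep out) := by unfold Spec_listtag; infer_instance

-- ===== CLAIM (what is proved, stated in full; the proofs are below) =====
def Claim_equal_listtag : Prop := ∀ (words : List String) (maxlength : Int) (minwordlen : Int) (n : Int) (sep : String), Dom_listtag words maxlength minwordlen n sep → Spec_listtag words maxlength minwordlen n sep (listtag words maxlength minwordlen n sep)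

-- ===== LEMMAS AND PROOFS =====

-- length of sep.join(ws[:k])
def costJ (sep : String) (ws : List String) (k : Nat) : Int :=
  PySem.Str.len (PySem.Str.join sep (ws.take k))

-- reference form of B's scan: the largest k in [2..hi] whose prefix cost fits, else 2
def bst (maxlength : Int) (sep : String) (ws : List String) : Nat → Nat
  | 0 => 2
  | 1 => 2
  | (k+2) => if costJ sep ws (k+2) ≤ maxlength then k+2 else bst maxlength sep ws (k+1)

lemma chars_join_snoc (sep c : List Char) :
    ∀ (m : List (List Char)), m ≠ [] →
      PySem.Chars.join sep (m ++ [c]) = PySem.Chars.join sep m ++ sep ++ c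
  | [], h => absurd rfl h
  | [p], _ => by
      simp [PySem.Chars.join_cons_cons, PySem.Chars.join_singleton]
  | p :: q :: rest, _ => by
      have ih := chars_join_snoc sep c (q :: rest) (by simp)
      simp only [List.cons_append] at ih ⊢
      rw [PySem.Chars.join_cons_cons, PySem.Chars.join_cons_cons, ih]
      simp [List.append_assoc]

lemma str_join_singleton_len (sep w : String) :
    PySem.Str.len (PySem.Str.join sep [w]) = PySem.Str.len w := by
  simp [PySem.Str.len_eq, PySem.Str.toList_join, PySem.Chars.join_singleton]

lemma str_join_snoc_len (sep w : String) (ws : List String) (h : ws ≠ []) :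
    PySem.Str.len (PySem.Str.join sep (ws ++ [w]))
      = PySem.Str.len (PySem.Str.join sep ws) + PySem.Str.len sep + PySem.Str.len w := by
  have hm : (ws.map String.toList) ≠ [] := by simpa using h
  simp [PySem.Str.len_eq, PySem.Str.toList_join, chars_join_snoc _ _ _ hm]
  ring

lemma altCosts_spec (sep : String) (ws : List String) :
    (altCosts sep ws).2 = (List.range ws.length).map (fun i => costJ sep ws (i+1)) ∧
    (altCosts sep ws).1 = if ws.length = 0 then 0 else costJ sep ws ws.length := by
  induction ws using List.reverseRecOn with
  | nil => simp [altCosts]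
  | append_singleton ws w ih =>
    obtain ⟨h2, h1⟩ := ih
    have hstep : altCosts sep (ws ++ [w])
        = (fun (p : Int × List Int) w =>
            let t := if p.2 = [] then PySem.Str.len w else p.1 + PySem.Str.len sep + PySem.Str.len w
            (t, p.2 ++ [t])) (altCosts sep ws) w := by
      simp [altCosts, List.foldl_append]
    rcases eq_or_ne ws [] with rfl | hne
    · have hc : costJ sep [w] 1 = PySem.Str.len w := by
        unfold costJ
        rw [show ([w] : List String).take 1 = [w] from rfl, str_join_singleton_len]
      refine ⟨?_, ?_⟩ <;>
        simp [altCosts, List.range_succ, hc]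
    · have hL : ws.length ≠ 0 := fun h => hne (List.length_eq_zero_iff.mp h)
      have hcost_old : ∀ i : Nat, i + 1 ≤ ws.length →
          costJ sep (ws ++ [w]) (i+1) = costJ sep ws (i+1) := by
        intro i hi; unfold costJ; rw [List.take_append_of_le_length hi]
      have hnew : costJ sep (ws ++ [w]) (ws.length + 1)
          = costJ sep ws ws.length + PySem.Str.len sep + PySem.Str.len w := by
        unfold costJ
        rw [List.take_of_length_le (by simp), List.take_length,
          str_join_snoc_len sep w ws hne]
      have hnil : ¬((List.range ws.length).map (fun i => costJ sep ws (i+1)) = []) := by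
        simp [hL]
      refine ⟨?_, ?_⟩
      · rw [hstep]
        simp only [h2, h1]
        rw [List.length_append, List.length_singleton, List.range_succ]
        simp only [List.map_append, List.map_cons, List.map_nil, if_neg hnil, if_neg hL]
        congr 1
        · exact (List.map_congr_left (fun i hi => by
            have : i + 1 ≤ ws.length := by simpa using List.mem_range.mp hi
            simp [hcost_old i this])).symm
        · simp [hnew]
      · rw [hstep]
        simp only [h2, h1, if_neg hnil, if_neg hL]
        simp [hnew, hL]

lemma bst_ge_two (maxlength : Int) (sep : String) (ws : List String) : ∀ k, 2 ≤ bst maxlength sep ws k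
  | 0 => by simp [bst]
  | 1 => by simp [bst]
  | (k+2) => by
      rw [bst]
      split
      · omega
      · exact bst_ge_two maxlength sep ws (k+1)

lemma take_bst_small (maxlength : Int) (sep : String) (ws : List String) (hL : ws.length < 2) (k : Nat) :
    ws.take (bst maxlength sep ws k) = ws :=
  List.take_of_length_le (by have := bst_ge_two maxlength sep ws k; omega)

lemma pyRange_empty (a b : Int) (h : b ≤ a) : PySem.List.pyRange a b = [] := by
  simp [PySem.List.pyRange]
  omega

lemma costs_getD (sep : String) (ws : List String) (k : Nat) (hk : k < ws.length) :
    PySem.List.pyGetD (altCosts sep ws).2 ((k : Int)) 0 = costJ sep ws (k+1) := by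
  rw [PySem.List.pyGetD_natCast, (altCosts_spec sep ws).1]
  rw [List.getD_eq_getElem?_getD]
  simp [hk]

lemma altBest_eq_bst_aux (maxlength : Int) (sep : String) (ws : List String) :
    ∀ (m : Nat), m ≤ ws.length →
      (PySem.List.pyRange 2 ((m : Int) + 1)).foldl
        (fun best k => if PySem.List.pyGetD (altCosts sep ws).2 (k - 1) 0 ≤ maxlength then k else best) 2
      = ((bst maxlength sep ws m : Nat) : Int) := by
  intro m
  induction m with
  | zero => intro _; rw [pyRange_empty _ _ (by omega)]; simp [bst]
  | succ m ih =>
    intro hm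
    rcases Nat.eq_zero_or_pos m with rfl | hpos
    · rw [pyRange_empty _ _ (by omega)]; simp [bst]
    · have hsplit : PySem.List.pyRange 2 ((m : Int) + 1 + 1)
          = PySem.List.pyRange 2 ((m : Int) + 1) ++ [(m : Int) + 1] := by
        rw [PySem.List.pyRange_one_append 2 ((m : Int) + 1) ((m : Int) + 1 + 1) (by omega) (by omega)]
        congr 1
        rw [PySem.List.pyRange_one_cons (by omega), pyRange_empty _ _ (by omega)]
      rw [show ((m + 1 : Nat) : Int) + 1 = (m : Int) + 1 + 1 by push_cast; ring, hsplit,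
        List.foldl_append, ih (by omega)]
      simp only [List.foldl_cons, List.foldl_nil]
      have hidx : (m : Int) + 1 - 1 = ((m : Nat) : Int) := by ring
      rw [hidx, costs_getD sep ws m (by omega)]
      obtain ⟨j, rfl⟩ : ∃ j, m = j + 1 := ⟨m - 1, by omega⟩
      rw [show j + 1 + 1 = j + 2 from rfl, bst]
      split <;> push_cast <;> ring

lemma altBest_eq_bst (maxlength : Int) (sep : String) (ws : List String) (hi : Int)
    (hhi : hi ≤ (ws.length : Int)) :
    altBest maxlength (altCosts sep ws).2 hi = ((bst maxlength sep ws hi.toNat : Nat) : Int) := by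
  rcases le_or_gt 0 hi with h0 | h0
  · have h2 := altBest_eq_bst_aux maxlength sep ws hi.toNat (by omega)
    rw [altBest, show hi + 1 = ((hi.toNat : Nat) : Int) + 1 by omega]
    exact h2
  · rw [altBest, pyRange_empty _ _ (by omega)]
    have : hi.toNat = 0 := by omega
    rw [this]
    simp [bst]

lemma loop_eq (ws : List String) (maxlength : Int) (sep : String) :
    ∀ (m : Nat) (n : Int), 2 ≤ n → (n - 2).toNat = m →
      listtagLoop ws maxlength sep n
        = PySem.Str.join sep (ws.take (bst maxlength sep ws (min n (ws.length : Int)).toNat)) := by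
  intro m
  induction m with
  | zero =>
    intro n hn hm
    have hn2 : n = 2 := by omega
    subst hn2
    rw [listtagLoop]
    rw [dif_pos (Or.inr (by omega))]
    rw [PySem.List.slice_to ws (by omega : (0:Int) ≤ 2)]
    rcases lt_or_ge ws.length 2 with hL | hL
    · rw [take_bst_small maxlength sep ws hL]
      rw [List.take_of_length_le (by omega)]
    · have : min (2 : Int) (ws.length : Int) = 2 := by omega
      rw [this]
      have : ((2 : Int)).toNat = 2 := rfl
      rw [this, bst]
      split <;> rfl
  | succ m ih =>
    intro n hn hm
    have hn3 : 3 ≤ n := by omega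
    rw [listtagLoop]
    rw [PySem.List.slice_to ws (by omega : (0:Int) ≤ n)]
    by_cases hfit : PySem.Str.len (PySem.Str.join sep (ws.take n.toNat)) ≤ maxlength
    · rw [dif_pos (Or.inl hfit)]
      rcases le_or_gt n (ws.length : Int) with hnL | hnL
      · have hmin : min n (ws.length : Int) = n := by omega
        rw [hmin]
        obtain ⟨j, hj⟩ : ∃ j : Nat, n.toNat = j + 2 := ⟨n.toNat - 2, by omega⟩
        rw [hj, bst, if_pos (by rw [← hj]; exact hfit), ← hj]
      · have hws : ws.take n.toNat = ws := List.take_of_length_le (by omega)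
        have hmin : min n (ws.length : Int) = (ws.length : Int) := by omega
        rw [hmin, Int.toNat_natCast]
        rcases lt_or_ge ws.length 2 with hL | hL
        · rw [hws, take_bst_small maxlength sep ws hL]
        · obtain ⟨j, hj⟩ : ∃ j : Nat, ws.length = j + 2 := ⟨ws.length - 2, by omega⟩
          have hfit' : costJ sep ws ws.length ≤ maxlength := by
            unfold costJ
            rw [List.take_length]
            rw [hws] at hfit
            exact hfit
          rw [hj] at hfit' ⊢
          rw [bst, if_pos hfit', ← hj, List.take_length, hws]
    · rw [dif_neg (by rw [not_or]; exact ⟨hfit, by omega⟩)]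
      rw [ih (n-1) (by omega) (by omega)]
      rcases le_or_gt n (ws.length : Int) with hnL | hnL
      · have hmin : min n (ws.length : Int) = n := by omega
        have hmin' : min (n-1) (ws.length : Int) = n - 1 := by omega
        rw [hmin, hmin']
        obtain ⟨j, hj⟩ : ∃ j : Nat, n.toNat = j + 2 := ⟨n.toNat - 2, by omega⟩
        have : (n - 1).toNat = j + 1 := by omega
        rw [this, hj, bst, if_neg (by rw [← hj]; exact hfit)]
      · have hmin : min n (ws.length : Int) = (ws.length : Int) := by omega
        have hmin' : min (n-1) (ws.length : Int) = (ws.length : Int) := by omega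
        rw [hmin, hmin']

-- ===== VERDICT (by name: the statement is the Claim_ definition above) =====
theorem listtag_spec : Claim_equal_listtag := by
  unfold Claim_equal_listtag
  intro words maxlength minwordlen n sep _
  unfold Spec_listtag listtag listtag_alt
  dsimp only
  by_cases hn : n < 2
  · rw [if_pos hn, listtagLoop, dif_pos (Or.inr (by omega))]
  · rw [if_neg hn]
    set ws := words.filter fun w => decide (minwordlen ≤ PySem.Str.len w) with hws
    rw [loop_eq ws maxlength sep (n-2).toNat n (by omega) rfl]
    rw [altBest_eq_bst maxlength sep ws (min n (ws.length : Int)) (min_le_right _ _)]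
    rw [PySem.List.slice_to ws (by positivity)]
    rw [Int.toNat_natCast]
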